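/- GENERATED by mk_final_copies.py from the proof of the farm's unit `get32` (farm:get32.1: Proof.lean) as the
   re-elaboration sweep compiled it — do not edit. -/
import Vorbis.Spec.Units.get32

open X86 X86.User Asan Vorbis Vorbis.Spec

set_option maxRecDepth 4000
set_option maxHeartbeats 16000000

namespace Vorbis.Spec.get32

/-- **What holds of the memory between two calls of `get8`**, relative to the memory `mem0` at the entry of `get32`: `Bits`
kept and μ not increased (`ReaderPost`), and `stream` moved forward by at most `k` bytes (`k` = the calls of `get8` so far). -/
structure BetweenCalls (Blk : Block → Prop) (len : Nat) (f : Nat) (mem0 mem : Mem) (k : Nat) : Prop where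
  reader : ReaderPost Blk len mem0 mem f
  lo : stb_vorbis.stream mem0 f ≤ stb_vorbis.stream mem f
  hi : stb_vorbis.stream mem f ≤ stb_vorbis.stream mem0 f + k

/-- At the entry of `get32`: nothing happened yet. -/
theorem BetweenCalls.start {Blk : Block → Prop} {len f : Nat} {mem0 : Mem} (h : Bits Blk len mem0 f) :
    BetweenCalls Blk len f mem0 mem0 0 :=
  ⟨ReaderPost.refl h, Nat.le_refl _, Nat.le_refl _⟩

/-- A store off `*f` (a push, the return address of a call) keeps `BetweenCalls`: `Reader.store_off_obj`, and `stream` reads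
the same. -/
theorem BetweenCalls.store {Blk : Block → Prop} {len f : Nat} {mem0 mem : Mem} {k : Nat}
    (h : BetweenCalls Blk len f mem0 mem k) (w : Word) (n v : Nat) (hw : w.toNat + n ≤ 2 ^ 64)
    (hoff : w.toNat + n ≤ f ∨ f + 1808 ≤ w.toNat) :
    BetweenCalls Blk len f mem0 (mem.writeLE w n v) k := by
  have hr := h.reader.bits.OBR
  simp only [voff] at hr
  have hs : Mem.EqOn f (f + 1808) mem (mem.writeLE w n v) := Mem.eqOn_writeLE mem w n v f 1808 hw (by omega)
  have es : stb_vorbis.stream (mem.writeLE w n v) f = stb_vorbis.stream mem f := by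
    simp only [vacc, voff]
    exact hs.ptr _ (by omega) (by omega) (by omega)
  have hp := (Reader.store_off_obj h.reader.bits w n v hw hoff).1
  refine ⟨h.reader.trans hp, ?_, ?_⟩
  · rw [es]
    exact h.lo
  · rw [es]
    exact h.hi

/-- One call of `get8` (the callee's entry state `s`, its returned state `v`): `ReaderPost` composes, `stream` moved forward
by at most one byte more (`Get8Post.stream_le`). -/
theorem BetweenCalls.get8 {Blk : Block → Prop} {len f : Nat} {mem0 : Mem} {k : Nat} {s v : State}
    (h : BetweenCalls Blk len f mem0 s.mem k) (hp : Get8Post Blk len f s v) : BetweenCalls Blk len f mem0 v.mem (k + 1) := by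
  have hle := hp.stream_le
  refine ⟨h.reader.trans hp.reader, ?_, ?_⟩
  · exact Nat.le_trans h.lo hle.1
  · have := h.hi
    omega

/-- `Bits` of the current memory: the precondition of the next `get8`. -/
theorem BetweenCalls.bits_of {Blk : Block → Prop} {len f : Nat} {mem0 mem : Mem} {k : Nat}
    (h : BetweenCalls Blk len f mem0 mem k) :
    Bits Blk len mem f :=
  h.reader.bits

end Vorbis.Spec.get32

/-- `get32(f)` satisfies its contract: three pushes, four calls of `get8` (the walker's general call rule, each followed by
`v_after_call`), the bytes combined in ebx / ebp / eax, three pops, `ret`. No check site of its own. Between two calls the proof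
carries: `hbtw<k> : BetweenCalls … u.mem s.mem k` (`Bits` kept, μ not increased, `stream` moved by ≤ k: the next call's
precondition and the post), `hsame<k>` (the footprint so far: what `v_untouched`, `u_same`, `u_frame` read through), and the
four stack slots `hs0` (the return address), `hs1 hs2 hs3` (the saved r12 rbp rbx). -/
theorem Vorbis.Spec.Worked.get32_ok : Vorbis.Spec.get32.Statement := by
  intro Lay hLay μ hμ u₀ hcode h_get8 others frames Blk len u ret he hpre
  v_entry he
  have hg := h_get8 others frames Blk len
  have hsh : ShadowPre others frames u := hpre.shadow
  have hsp := hsh.rsp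
  -- where `*f` is: one arithmetic fact (off the text, inside the data space, off this function's stack)
  have hwhere := hpre.where_obj
  have hbtw0 : Vorbis.Spec.get32.BetweenCalls Blk len (u.reg .rdi).toNat u.mem u.mem 0 :=
    Vorbis.Spec.get32.BetweenCalls.start hpre.bits
  -- 104d40H … 104d47H (stb_vorbis_fixed.c:1381-1383): `push r12 ; push rbp ; push rbx ; mov r12, rdi ; call get8`
  u_walk hcode [hμ.vendor] span [Vorbis.L.textLo, Vorbis.L.textHi] side (v_side)
  · -- call_inv: DF and the MXCSR masks at the callee's entry
    v_inv
  · -- pre_104d47, the precondition of get8 no. 1: our own, over the three pushes and the return address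
    show ReaderPre others frames Blk len s_104d47
    refine hpre.again ?_ (w_kept.get .rdi rfl) ?_
    · -- the shadow clause at the callee's entry: no store so far went to the shadow, the stack pointer is lower
      refine hsh.callee ?_ ?_ ?_ ?_
      · v_untouched
      · rw [w_rsp]
        u_omega
      · rw [w_rsp]
        u_omega
      · rw [w_rsp]
        u_omega
    · -- `Bits`: the four stores are off `*f`
      rw [w_mem]
      refine Vorbis.Spec.get32.BetweenCalls.bits_of (mem0 := u.mem) (k := 0) ?_
      refine Vorbis.Spec.get32.BetweenCalls.store ?_ _ _ _ (by u_omega) (by u_omega)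
      refine Vorbis.Spec.get32.BetweenCalls.store ?_ _ _ _ (by u_omega) (by u_omega)
      refine Vorbis.Spec.get32.BetweenCalls.store ?_ _ _ _ (by u_omega) (by u_omega)
      refine Vorbis.Spec.get32.BetweenCalls.store ?_ _ _ _ (by u_omega) (by u_omega)
      exact hbtw0
  · -- 104d4cH (stb_vorbis_fixed.c:1383): after get8 no. 1. First what held at ITS entry `s_104d47`: `BetweenCalls`, the saved
    -- registers
    have c_rdi : s_104d47.reg .rdi = u.reg .rdi := w_kept_104d47.get .rdi rfl
    have hq1 : UInt64.ofNat (s_104d47.mem.readLE (u.reg .rsp - 8) 8) = u.reg .r12 := by u_resolve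
    have hq2 : UInt64.ofNat (s_104d47.mem.readLE (u.reg .rsp - 16) 8) = u.reg .rbp := by u_resolve
    have hq3 : UInt64.ofNat (s_104d47.mem.readLE (u.reg .rsp - 24) 8) = u.reg .rbx := by u_resolve
    have hm1 : Vorbis.Spec.get32.BetweenCalls Blk len (u.reg .rdi).toNat u.mem s_104d47.mem 0 := by
      rw [w_mem_104d47]
      refine Vorbis.Spec.get32.BetweenCalls.store ?_ _ _ _ (by u_omega) (by u_omega)
      refine Vorbis.Spec.get32.BetweenCalls.store ?_ _ _ _ (by u_omega) (by u_omega)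
      refine Vorbis.Spec.get32.BetweenCalls.store ?_ _ _ _ (by u_omega) (by u_omega)
      refine Vorbis.Spec.get32.BetweenCalls.store ?_ _ _ _ (by u_omega) (by u_omega)
      exact hbtw0
    rw [w_mem_104d47] at hq1 hq2 hq3
    v_after_call w_rsp_104d47 w_mem_104d47
    rw [c_rdi] at w_same
    have hp1 : Get8Post Blk len (u.reg .rdi).toNat s_104d47 s_104d47r := by
      have h := w_post
      simp only [Vorbis.Spec.get8.spec, c_rdi] at h
      exact h
    have hbtw1 := hm1.get8 hp1
    -- the stack slots, carried over the callee's footprint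
    have hs0 : UInt64.ofNat (s_104d47r.mem.readLE (u.reg .rsp) 8) = ret := by
      u_frame he_retAddr
    have hs1 : UInt64.ofNat (s_104d47r.mem.readLE (u.reg .rsp - 8) 8) = u.reg .r12 := by
      u_frame hq1
    have hs2 : UInt64.ofNat (s_104d47r.mem.readLE (u.reg .rsp - 16) 8) = u.reg .rbp := by
      u_frame hq2
    have hs3 : UInt64.ofNat (s_104d47r.mem.readLE (u.reg .rsp - 24) 8) = u.reg .rbx := by
      u_frame hq3
    -- the footprint so far: the stack below the return address, `stream`, `eof`
    have hsame1 : Mem.SameExcept [⟨(u.reg .rsp).toNat - 80, (u.reg .rsp).toNat⟩,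
        ⟨(u.reg .rdi).toNat + 48, (u.reg .rdi).toNat + 56⟩, ⟨(u.reg .rdi).toNat + 136, (u.reg .rdi).toNat + 140⟩]
        u.mem s_104d47r.mem := by
      u_same
    clear hq1 hq2 hq3 w_same hp1 hm1 w_post
    -- 104d4cH … 104d52H (c:1383-1384): `movzx ebx, al ; mov rdi, r12 ; call get8`
    u_walk hcode [hμ.vendor] span [Vorbis.L.textLo, Vorbis.L.textHi] side (v_side)
    · -- call_inv
      v_inv
    · -- pre_104d52, the precondition of get8 no. 2: what get8 no. 1 returned, over the return address pushed
      show ReaderPre others frames Blk len s_104d52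
      refine hpre.again ?_ w_rdi ?_
      · -- the shadow clause at the callee's entry: no store so far went to the shadow, the stack pointer is lower
        refine hsh.callee ?_ ?_ ?_ ?_
        · v_untouched
        · rw [w_rsp]
          u_omega
        · rw [w_rsp]
          u_omega
        · rw [w_rsp]
          u_omega
      · -- `Bits`: from `BetweenCalls`, the store is off `*f`
        rw [w_mem]
        exact Vorbis.Spec.get32.BetweenCalls.bits_of (hbtw1.store _ _ _ (by u_omega) (by u_omega))
    · -- 104d57H (stb_vorbis_fixed.c:1384): after get8 no. 2
      have hm2 : Vorbis.Spec.get32.BetweenCalls Blk len (u.reg .rdi).toNat u.mem s_104d52.mem 1 := by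
        rw [w_mem_104d52]
        exact hbtw1.store _ _ _ (by u_omega) (by u_omega)
      v_after_call w_rsp_104d52 w_mem_104d52
      rw [w_rdi_104d52] at w_same
      have hp2 : Get8Post Blk len (u.reg .rdi).toNat s_104d52 s_104d52r := by
        have h := w_post
        simp only [Vorbis.Spec.get8.spec, w_rdi_104d52] at h
        exact h
      have hbtw2 := hm2.get8 hp2
      -- the stack slots, carried over the callee's footprint
      replace hs0 : UInt64.ofNat (s_104d52r.mem.readLE (u.reg .rsp) 8) = ret := by
        u_frame hs0
      replace hs1 : UInt64.ofNat (s_104d52r.mem.readLE (u.reg .rsp - 8) 8) = u.reg .r12 := by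
        u_frame hs1
      replace hs2 : UInt64.ofNat (s_104d52r.mem.readLE (u.reg .rsp - 16) 8) = u.reg .rbp := by
        u_frame hs2
      replace hs3 : UInt64.ofNat (s_104d52r.mem.readLE (u.reg .rsp - 24) 8) = u.reg .rbx := by
        u_frame hs3
      -- the footprint so far
      have hsame2 : Mem.SameExcept [⟨(u.reg .rsp).toNat - 80, (u.reg .rsp).toNat⟩,
          ⟨(u.reg .rdi).toNat + 48, (u.reg .rdi).toNat + 56⟩, ⟨(u.reg .rdi).toNat + 136, (u.reg .rdi).toNat + 140⟩]
          u.mem s_104d52r.mem := by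
        u_same
      clear w_same hp2 hm2 w_post hsame1 hbtw1
      -- 104d57H … 104d62H (c:1384-1385): `movzx ebp, al ; shl ebp, 8 ; add ebp, ebx ; mov rdi, r12 ; call get8`
      u_walk hcode [hμ.vendor] span [Vorbis.L.textLo, Vorbis.L.textHi] side (v_side)
      · -- call_inv
        v_inv
      · -- pre_104d62, the precondition of get8 no. 3: what get8 no. 2 returned, over the return address pushed
        show ReaderPre others frames Blk len s_104d62
        refine hpre.again ?_ w_rdi ?_
        · -- the shadow clause at the callee's entry: no store so far went to the shadow, the stack pointer is lower
          refine hsh.callee ?_ ?_ ?_ ?_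
          · v_untouched
          · rw [w_rsp]
            u_omega
          · rw [w_rsp]
            u_omega
          · rw [w_rsp]
            u_omega
        · -- `Bits`: from `BetweenCalls`, the store is off `*f`
          rw [w_mem]
          exact Vorbis.Spec.get32.BetweenCalls.bits_of (hbtw2.store _ _ _ (by u_omega) (by u_omega))
      · -- 104d67H (stb_vorbis_fixed.c:1385): after get8 no. 3
        have hm3 : Vorbis.Spec.get32.BetweenCalls Blk len (u.reg .rdi).toNat u.mem s_104d62.mem 2 := by
          rw [w_mem_104d62]
          exact hbtw2.store _ _ _ (by u_omega) (by u_omega)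
        v_after_call w_rsp_104d62 w_mem_104d62
        rw [w_rdi_104d62] at w_same
        have hp3 : Get8Post Blk len (u.reg .rdi).toNat s_104d62 s_104d62r := by
          have h := w_post
          simp only [Vorbis.Spec.get8.spec, w_rdi_104d62] at h
          exact h
        have hbtw3 := hm3.get8 hp3
        -- the stack slots, carried over the callee's footprint
        replace hs0 : UInt64.ofNat (s_104d62r.mem.readLE (u.reg .rsp) 8) = ret := by
          u_frame hs0
        replace hs1 : UInt64.ofNat (s_104d62r.mem.readLE (u.reg .rsp - 8) 8) = u.reg .r12 := by
          u_frame hs1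
        replace hs2 : UInt64.ofNat (s_104d62r.mem.readLE (u.reg .rsp - 16) 8) = u.reg .rbp := by
          u_frame hs2
        replace hs3 : UInt64.ofNat (s_104d62r.mem.readLE (u.reg .rsp - 24) 8) = u.reg .rbx := by
          u_frame hs3
        -- the footprint so far
        have hsame3 : Mem.SameExcept [⟨(u.reg .rsp).toNat - 80, (u.reg .rsp).toNat⟩,
            ⟨(u.reg .rdi).toNat + 48, (u.reg .rdi).toNat + 56⟩, ⟨(u.reg .rdi).toNat + 136, (u.reg .rdi).toNat + 140⟩]
            u.mem s_104d62r.mem := by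
          u_same
        clear w_same hp3 hm3 w_post hsame2 hbtw2
        -- 104d67H … 104d72H (c:1385-1386): `movzx ebx, al ; shl ebx, 16 ; add ebx, ebp ; mov rdi, r12 ; call get8`
        u_walk hcode [hμ.vendor] span [Vorbis.L.textLo, Vorbis.L.textHi] side (v_side)
        · -- call_inv
          v_inv
        · -- pre_104d72, the precondition of get8 no. 4: what get8 no. 3 returned, over the return address pushed
          show ReaderPre others frames Blk len s_104d72
          refine hpre.again ?_ w_rdi ?_
          · -- the shadow clause at the callee's entry: no store so far went to the shadow, the stack pointer is lower
            refine hsh.callee ?_ ?_ ?_ ?_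
            · v_untouched
            · rw [w_rsp]
              u_omega
            · rw [w_rsp]
              u_omega
            · rw [w_rsp]
              u_omega
          · -- `Bits`: from `BetweenCalls`, the store is off `*f`
            rw [w_mem]
            exact Vorbis.Spec.get32.BetweenCalls.bits_of (hbtw3.store _ _ _ (by u_omega) (by u_omega))
        · -- 104d77H (stb_vorbis_fixed.c:1386): after get8 no. 4
          have hm4 : Vorbis.Spec.get32.BetweenCalls Blk len (u.reg .rdi).toNat u.mem s_104d72.mem 3 := by
            rw [w_mem_104d72]
            exact hbtw3.store _ _ _ (by u_omega) (by u_omega)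
          v_after_call w_rsp_104d72 w_mem_104d72
          rw [w_rdi_104d72] at w_same
          have hp4 : Get8Post Blk len (u.reg .rdi).toNat s_104d72 s_104d72r := by
            have h := w_post
            simp only [Vorbis.Spec.get8.spec, w_rdi_104d72] at h
            exact h
          have hbtw4 := hm4.get8 hp4
          -- the stack slots, carried over the callee's footprint
          replace hs0 : UInt64.ofNat (s_104d72r.mem.readLE (u.reg .rsp) 8) = ret := by
            u_frame hs0
          replace hs1 : UInt64.ofNat (s_104d72r.mem.readLE (u.reg .rsp - 8) 8) = u.reg .r12 := by
            u_frame hs1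
          replace hs2 : UInt64.ofNat (s_104d72r.mem.readLE (u.reg .rsp - 16) 8) = u.reg .rbp := by
            u_frame hs2
          replace hs3 : UInt64.ofNat (s_104d72r.mem.readLE (u.reg .rsp - 24) 8) = u.reg .rbx := by
            u_frame hs3
          -- the footprint so far
          have hsame4 : Mem.SameExcept [⟨(u.reg .rsp).toNat - 80, (u.reg .rsp).toNat⟩,
              ⟨(u.reg .rdi).toNat + 48, (u.reg .rdi).toNat + 56⟩, ⟨(u.reg .rdi).toNat + 136, (u.reg .rdi).toNat + 140⟩]
              u.mem s_104d72r.mem := by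
            u_same
          clear w_same hp4 hm4 w_post hsame3 hbtw3
          -- 104d77H … 104d80H (stb_vorbis_fixed.c:1386-1388): `shl eax, 24 ; add eax, ebx ; pop rbx ; pop rbp ; pop r12 ; ret`
          u_walk hcode [hμ.vendor] span [Vorbis.L.textLo, Vorbis.L.textHi] side (v_side)
          -- the state after the `ret`: the contract's `Returned`
          refine ReachVia.done ?_
          v_returned
          show Get32Post Blk len (u.reg .rdi).toNat u s_104d80
          refine ⟨?_, ?_, ?_, ?_⟩
          · -- no store of get32 or of the four get8 went to the shadow
            v_untouched
          · -- `Bits` kept, μ not increased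
            rw [w_mem]
            exact hbtw4.reader
          · -- `add eax, ebx` writes a 32-bit value, zero-extended into rax
            rw [w_rax, Vorbis.toNat_ofBV32]
            exact BitVec.isLt _
          · -- `stream` moved forward by at most four bytes
            rw [w_mem]
            exact ⟨hbtw4.lo, hbtw4.hi⟩
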